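-- pv_equiv track=rewrite | github.com/DmitryMlro/home_work_11_2 | hm11_2.py | generate_cube_numbers
-- ===== SOURCE A (Python) =====
-- from typing import Generator
--
-- def generate_cube_numbers(end: int) -> Generator[int, None, None]:
--     """
--     Генератор, який створює числа у кубі, починаючи з 2, поки значення менше або дорівнює end
--
--     Args:
--         end (int): верхня межа генерації чисел у кубі
--
--     Yields:
--         int: куб числа, якщо він <= end
--     """
--     number: int = 2
--     while True:
--         cub: int = number ** 3
--         if cub > end:
--             return
--         yield cub
--         number += 1
-- ===== SOURCE B (Python) =====
-- def generate_cube_numbers(end):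
--     # exact integer cube root by doubling + bisection, then one bounded range
--     lo, hi = 0, 1
--     while hi ** 3 <= end:
--         hi *= 2
--     while hi - lo > 1:
--         mid = (lo + hi) // 2
--         if mid ** 3 <= end:
--             lo = mid
--         else:
--             hi = mid
--     for n in range(2, lo + 1):
--         yield n ** 3
-- ===== Notes on version B (the rewrite author's own statement) =====
-- stated objective: alternative
-- what changed: B computes the exact integer cube root of end by doubling+bisection up front and then yields n**3 over a bounded range(2, m+1), replacing A's sentinel-terminated unbounded while loop.
import Mathlib
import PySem

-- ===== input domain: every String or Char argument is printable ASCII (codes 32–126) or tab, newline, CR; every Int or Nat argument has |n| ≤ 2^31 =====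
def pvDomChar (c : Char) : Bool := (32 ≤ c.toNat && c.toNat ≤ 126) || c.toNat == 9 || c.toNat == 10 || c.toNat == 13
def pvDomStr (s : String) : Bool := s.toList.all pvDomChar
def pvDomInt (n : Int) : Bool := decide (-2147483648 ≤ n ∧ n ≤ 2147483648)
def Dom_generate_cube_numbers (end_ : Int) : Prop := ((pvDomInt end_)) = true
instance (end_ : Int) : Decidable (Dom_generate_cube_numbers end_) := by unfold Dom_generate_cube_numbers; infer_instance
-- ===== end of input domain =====

-- B replaces A's sentinel-terminated unbounded while loop by an exact integer cube
-- root (doubling + bisection) followed by one bounded range traversal (objective: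
-- alternative decomposition). Both Pythons are generators; equality is about the
-- list of yielded values. The Nat fuel arguments below are totality guards only;
-- each is proved sufficient, so the fueled recursion computes exactly its loop.

-- ===== PORT A =====
-- A's 'while True: cub = number ** 3; if cub > end: return; yield cub; number += 1'
def pvLoopA (end_ : Int) : Nat → Int → List Int
  | 0, _ => []
  | fuel + 1, number =>
    if number ^ 3 > end_ then []
    else number ^ 3 :: pvLoopA end_ fuel (number + 1)

def generate_cube_numbers (end_ : Int) : List Int :=
  pvLoopA end_ (end_ + 1).toNat 2

-- ===== PORT B =====
-- B's 'while hi ** 3 <= end: hi *= 2'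
def pvGrow (end_ : Int) : Nat → Int → Int
  | 0, hi => hi
  | fuel + 1, hi => if hi ^ 3 ≤ end_ then pvGrow end_ fuel (hi * 2) else hi

-- B's 'while hi - lo > 1: mid = (lo + hi) // 2; if mid ** 3 <= end: lo = mid else: hi = mid'
def pvBisect (end_ : Int) : Nat → Int → Int → Int
  | 0, lo, _ => lo
  | fuel + 1, lo, hi =>
    if hi - lo > 1 then
      let mid := PySem.Int.floordiv (lo + hi) 2
      if mid ^ 3 ≤ end_ then pvBisect end_ fuel mid hi
      else pvBisect end_ fuel lo mid
    else lo

-- B: m = exact integer cube root of end_, then one bounded range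
def generate_cube_numbers_alt (end_ : Int) : List Int :=
  let hi := pvGrow end_ (end_ + 1).toNat 1
  let m := pvBisect end_ hi.toNat 0 hi
  (PySem.List.pyRange 2 (m + 1) 1).map (fun n => n ^ 3)

-- ===== PRECONDITION & SPEC =====
def Spec_generate_cube_numbers (end_ : Int) (out : List Int) : Prop := out = generate_cube_numbers_alt end_
instance (end_ : Int) (out : List Int) : Decidable (Spec_generate_cube_numbers end_ out) := by unfold Spec_generate_cube_numbers; infer_instance

-- ===== CLAIM (what is proved, stated in full; the proofs are below) =====
def Claim_equal_generate_cube_numbers : Prop := ∀ (end_ : Int), Dom_generate_cube_numbers end_ → Spec_generate_cube_numbers end_ (generate_cube_numbers end_)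

-- ===== LEMMAS AND PROOFS =====

theorem pv_cube_ge_self (n : Int) (h : 1 ≤ n) : n ≤ n ^ 3 := by
  nlinarith [sq_nonneg n, sq_nonneg (n - 1)]

-- with sufficient fuel the doubling loop exits with 1 ≤ hi and end_ < hi³
theorem pvGrow_spec (end_ : Int) (fuel : Nat) (hi : Int) (h1 : 1 ≤ hi)
    (hf : end_ + 1 - hi ≤ (fuel : Int)) :
    1 ≤ pvGrow end_ fuel hi ∧ end_ < (pvGrow end_ fuel hi) ^ 3 := by
  induction fuel generalizing hi with
  | zero =>
    have := pv_cube_ge_self hi h1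
    simp only [pvGrow]
    omega
  | succ f ih =>
    simp only [pvGrow]
    split
    · exact ih (hi * 2) (by omega) (by omega)
    · constructor
      · exact h1
      · omega

-- with sufficient fuel the bisection returns m ≥ 0 with m³ ≤ end_ (or m = 0) and end_ < (m+1)³
theorem pvBisect_char (end_ : Int) (fuel : Nat) (lo hi : Int) (hlt : lo < hi)
    (hf : hi - lo ≤ (fuel : Int) + 1) (h0 : 0 ≤ lo)
    (hlo : lo = 0 ∨ lo ^ 3 ≤ end_) (hhi : end_ < hi ^ 3) :
    0 ≤ pvBisect end_ fuel lo hi ∧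
      (pvBisect end_ fuel lo hi = 0 ∨ (pvBisect end_ fuel lo hi) ^ 3 ≤ end_) ∧
      end_ < (pvBisect end_ fuel lo hi + 1) ^ 3 := by
  induction fuel generalizing lo hi with
  | zero =>
    have : hi = lo + 1 := by omega
    subst this
    simp only [pvBisect]
    exact ⟨h0, hlo, hhi⟩
  | succ f ih =>
    simp only [pvBisect]
    split
    · next hgap =>
      have hm1 : lo < PySem.Int.floordiv (lo + hi) 2 := by
        have := (PySem.Int.le_floordiv_iff_mul_le (a := lo + hi) (b := 2) (q := lo + 1) (by omega)).mpr (by omega)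
        omega
      have hm2 : PySem.Int.floordiv (lo + hi) 2 < hi := by
        have := (PySem.Int.floordiv_lt_iff_lt_mul (a := lo + hi) (b := 2) (q := hi) (by omega)).mpr (by omega)
        omega
      split
      · next hc => exact ih _ _ hm2 (by omega) (by omega) (Or.inr hc) hhi
      · next hc => exact ih _ _ hm1 (by omega) h0 hlo (by omega)
    · next hgap =>
      have : hi = lo + 1 := by omega
      subst this
      exact ⟨h0, hlo, hhi⟩

-- with sufficient fuel A's loop from any start yields the cubes of the range up to the cube root m
theorem pvLoopA_eq (end_ m : Int) (hm0 : 0 ≤ m) (hm1 : m = 0 ∨ m ^ 3 ≤ end_)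
    (hm2 : end_ < (m + 1) ^ 3) (fuel : Nat) (number : Int) (h2 : 2 ≤ number)
    (hf : m + 1 - number ≤ (fuel : Int)) :
    pvLoopA end_ fuel number = (PySem.List.pyRange number (m + 1) 1).map (fun n => n ^ 3) := by
  induction fuel generalizing number with
  | zero =>
    simp only [pvLoopA]
    rw [PySem.List.pyRange_one]
    have : (m + 1 - number).toNat = 0 := by omega
    simp [this]
  | succ f ih =>
    simp only [pvLoopA]
    split
    · next h =>
      have hk : m + 1 ≤ number := by
        by_contra hx
        have hkm : number ≤ m := by omega
        have : number ^ 3 ≤ m ^ 3 := pow_le_pow_left₀ (by omega) hkm 3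
        rcases hm1 with h0 | h1 <;> omega
      rw [PySem.List.pyRange_one]
      have : (m + 1 - number).toNat = 0 := by omega
      simp [this]
    · next h =>
      have hk : number ≤ m := by
        by_contra hx
        have : (m + 1) ^ 3 ≤ number ^ 3 := pow_le_pow_left₀ (by omega) (by omega) 3
        omega
      rw [PySem.List.pyRange_one_cons (by omega)]
      simp only [List.map_cons]
      rw [ih (number + 1) (by omega) (by omega)]

-- ===== VERDICT (by name: the statement is the Claim_ definition above) =====
theorem generate_cube_numbers_spec : Claim_equal_generate_cube_numbers := by
  intro end_ _
  unfold Spec_generate_cube_numbers generate_cube_numbers generate_cube_numbers_alt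
  obtain ⟨hr1, hr2⟩ := pvGrow_spec end_ (end_ + 1).toNat 1 (by omega) (by omega)
  obtain ⟨h0, h1, h2⟩ := pvBisect_char end_ (pvGrow end_ (end_ + 1).toNat 1).toNat 0
    (pvGrow end_ (end_ + 1).toNat 1) (by omega) (by omega) (by omega) (Or.inl rfl) hr2
  have hm : pvBisect end_ (pvGrow end_ (end_ + 1).toNat 1).toNat 0 (pvGrow end_ (end_ + 1).toNat 1) = 0 ∨ pvBisect end_ (pvGrow end_ (end_ + 1).toNat 1).toNat 0 (pvGrow end_ (end_ + 1).toNat 1) ≤ end_ := by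
    rcases h1 with hz | hc
    · exact Or.inl hz
    · rcases (by omega : pvBisect end_ (pvGrow end_ (end_ + 1).toNat 1).toNat 0 (pvGrow end_ (end_ + 1).toNat 1) = 0 ∨ 1 ≤ pvBisect end_ (pvGrow end_ (end_ + 1).toNat 1).toNat 0 (pvGrow end_ (end_ + 1).toNat 1)) with h | h
      · exact Or.inl h
      · right
        have := pv_cube_ge_self _ h
        omega
  exact pvLoopA_eq end_ _ h0 h1 h2 _ 2 (by omega) (by omega)
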